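-- pv_equiv track=rewrite | github.com/spartow/grader-validation-protocol | scripts/score_wave2_heuristic.py | _doctest_pairs
-- ===== SOURCE A (Python) =====
-- def _doctest_pairs(source: str):
--     """
--     Extract (expression, expected_str_or_None) pairs from *source*
--     by scanning for '>>>' lines.
--     """
--     lines = source.splitlines()
--     pairs = []
--     i = 0
--     while i < len(lines):
--         stripped = lines[i].strip()
--         if stripped.startswith(">>>"):
--             expr = stripped[3:].strip()
--             # Continuation lines (... prefix) – concatenate
--             while i + 1 < len(lines) and lines[i + 1].strip().startswith("..."):
--                 i += 1
--                 expr += "\n" + lines[i].strip()[3:].strip()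
--             # Expected: next non-blank line that doesn't start with >>>
--             expected = None
--             if i + 1 < len(lines):
--                 nxt = lines[i + 1].strip()
--                 if nxt and not nxt.startswith(">>>") and not nxt.startswith("..."):
--                     expected = nxt
--             pairs.append((expr, expected))
--         i += 1
--     return pairs
-- ===== SOURCE B (Python) =====
-- def _doctest_pairs(source: str):
--     """
--     Extract (expression, expected_str_or_None) pairs from *source*
--     by scanning for '>>>' lines.
--     """
--     pairs = []
--     current = None  # expression being collected, or None when idle
--     for line in source.splitlines():
--         s = line.strip()
--         if s.startswith(">>>"):
--             if current is not None:
--                 pairs.append((current, None))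
--             current = s[3:].strip()
--         elif s.startswith("..."):
--             if current is not None:
--                 current = current + "\n" + s[3:].strip()
--         else:
--             if current is not None:
--                 pairs.append((current, s if s else None))
--                 current = None
--     if current is not None:
--         pairs.append((current, None))
--     return pairs
-- ===== Notes on version B (the rewrite author's own statement) =====
-- stated objective: simpler
-- what changed: Replaced the index-based while loop with a nested lookahead continuation loop and a re-scan of the expected line by a single foldl-style pass carrying an explicit state (the currently open expression or None), flushing pairs as lines are consumed.
import Mathlib
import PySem

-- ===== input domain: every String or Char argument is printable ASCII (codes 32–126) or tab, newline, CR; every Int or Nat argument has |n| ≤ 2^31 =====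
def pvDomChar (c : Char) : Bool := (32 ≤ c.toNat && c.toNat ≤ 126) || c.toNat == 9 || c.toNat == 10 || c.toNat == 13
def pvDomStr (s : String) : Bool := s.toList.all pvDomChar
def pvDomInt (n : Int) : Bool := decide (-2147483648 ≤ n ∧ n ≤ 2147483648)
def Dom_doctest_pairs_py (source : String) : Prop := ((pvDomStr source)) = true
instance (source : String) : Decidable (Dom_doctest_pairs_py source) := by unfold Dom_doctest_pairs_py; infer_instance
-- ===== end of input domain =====

-- B replaces A's index-based lookahead scan by a single stateful pass (open-expression accumulator); same results, simpler shape.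

-- ===== PORT A =====
-- inner 'while' of A: consume '...' continuation lines, returning (expr, remaining lines)
def pvContA (expr : String) : List String → String × List String
  | [] => (expr, [])
  | nxt :: rest =>
    if PySem.Str.startswith (PySem.Str.strip nxt) "..." then
      pvContA (expr ++ "\n" ++ PySem.Str.strip (PySem.Str.slice (PySem.Str.strip nxt) (some 3) none)) rest
    else (expr, nxt :: rest)

theorem pvContA_len (expr : String) (l : List String) : (pvContA expr l).2.length ≤ l.length := by
  induction l generalizing expr with
  | nil => simp [pvContA]
  | cons x rest ih =>
    simp only [pvContA]
    split
    · exact (ih _).trans (Nat.le_succ _)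
    · simp

-- A's expected-line lookahead: 'if i + 1 < len(lines): nxt = ...'
def pvExpectedA : List String → Option String
  | [] => none
  | nxt0 :: _ =>
    let nxt := PySem.Str.strip nxt0
    if nxt ≠ "" ∧ ¬ PySem.Str.startswith nxt ">>>" ∧ ¬ PySem.Str.startswith nxt "..." then some nxt
    else none

-- A's outer 'while i < len(lines)' loop
def pvLoopA : List String → List (String × Option String)
  | [] => []
  | cur :: rest =>
    let stripped := PySem.Str.strip cur
    if PySem.Str.startswith stripped ">>>" then
      let p := pvContA (PySem.Str.strip (PySem.Str.slice stripped (some 3) none)) rest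
      (p.1, pvExpectedA p.2) :: pvLoopA p.2
    else pvLoopA rest
termination_by l => l.length
decreasing_by
  · exact Nat.lt_succ_of_le (pvContA_len _ _)
  · simp

def doctest_pairs_py (source : String) : List (String × Option String) :=
  pvLoopA (PySem.Str.splitlines source)

-- ===== PORT B =====
-- one step of B's pass; state = (pairs so far, currently open expression or none)
def pvStepB (st : List (String × Option String) × Option String) (line : String) :
    List (String × Option String) × Option String :=
  let s := PySem.Str.strip line
  if PySem.Str.startswith s ">>>" then
    let acc := match st.2 with
      | none => st.1
      | some e => st.1 ++ [(e, none)]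
    (acc, some (PySem.Str.strip (PySem.Str.slice s (some 3) none)))
  else if PySem.Str.startswith s "..." then
    match st.2 with
    | some e => (st.1, some (e ++ "\n" ++ PySem.Str.strip (PySem.Str.slice s (some 3) none)))
    | none => st
  else
    match st.2 with
    | some e => (st.1 ++ [(e, if s = "" then none else some s)], none)
    | none => st

def doctest_pairs_py_alt (source : String) : List (String × Option String) :=
  let fin := (PySem.Str.splitlines source).foldl pvStepB ([], none)
  match fin.2 with
  | none => fin.1
  | some e => fin.1 ++ [(e, none)]

-- ===== PRECONDITION & SPEC =====
def Spec_doctest_pairs_py (source : String) (out : List (String × Option String)) : Prop := out = doctest_pairs_py_alt source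
instance (source : String) (out : List (String × Option String)) : Decidable (Spec_doctest_pairs_py source out) := by unfold Spec_doctest_pairs_py; infer_instance

-- ===== CLAIM (what is proved, stated in full; the proofs are below) =====
def Claim_equal_doctest_pairs_py : Prop := ∀ (source : String), Dom_doctest_pairs_py source → Spec_doctest_pairs_py source (doctest_pairs_py source)

-- ===== LEMMAS AND PROOFS =====

-- final flush of B's fold state
def pvFinish (st : List (String × Option String) × Option String) : List (String × Option String) :=
  match st.2 with
  | none => st.1
  | some e => st.1 ++ [(e, none)]

-- what B produces from state (acc, e?) on the remaining lines, phrased via A's loops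
def pvASide (e? : Option String) (l : List String) : List (String × Option String) :=
  match e? with
  | none => pvLoopA l
  | some e => ((pvContA e l).1, pvExpectedA (pvContA e l).2) :: pvLoopA (pvContA e l).2

theorem pv_not_both (s : List Char) (h : PySem.Chars.startswith s ['>', '>', '>'] = true) :
    PySem.Chars.startswith s ['.', '.', '.'] = false := by
  by_contra hc
  rw [Bool.not_eq_false] at hc
  rw [PySem.Chars.startswith_iff] at h hc
  have := List.prefix_of_prefix_length_le h hc (by simp)
  simp [List.IsPrefix] at this

theorem pv_fold_eq (l : List String) : ∀ (acc : List (String × Option String)) (e? : Option String),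
    pvFinish (l.foldl pvStepB (acc, e?)) = acc ++ pvASide e? l := by
  induction l with
  | nil =>
    intro acc e?
    cases e? <;> simp [pvFinish, pvASide, pvContA, pvExpectedA, pvLoopA]
  | cons x rest ih =>
    intro acc e?
    by_cases hgt : PySem.Chars.startswith (PySem.Chars.strip x.toList) ['>', '>', '>'] = true
    · have hdot := pv_not_both _ hgt
      cases e? with
      | none =>
        rw [List.foldl_cons]
        have hstep : pvStepB (acc, none) x =
            (acc, some (PySem.Str.strip (PySem.Str.slice (PySem.Str.strip x) (some 3) none))) := by
          simp [pvStepB, hgt]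
        rw [hstep, ih]
        simp [pvASide, pvLoopA, hgt]
      | some e =>
        rw [List.foldl_cons]
        have hstep : pvStepB (acc, some e) x =
            (acc ++ [(e, none)], some (PySem.Str.strip (PySem.Str.slice (PySem.Str.strip x) (some 3) none))) := by
          simp [pvStepB, hgt]
        rw [hstep, ih]
        have hcont : pvContA e (x :: rest) = (e, x :: rest) := by
          simp [pvContA, hdot]
        have hexp : pvExpectedA (x :: rest) = none := by
          simp [pvExpectedA, hgt]
        simp only [pvASide, hcont, hexp]
        rw [pvLoopA]
        simp [hgt]
    · rw [Bool.not_eq_true] at hgt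
      by_cases hdot : PySem.Chars.startswith (PySem.Chars.strip x.toList) ['.', '.', '.'] = true
      · cases e? with
        | none =>
          rw [List.foldl_cons]
          have hstep : pvStepB (acc, none) x = (acc, none) := by
            simp [pvStepB, hgt, hdot]
          rw [hstep, ih]
          simp only [pvASide]
          rw [pvLoopA]
          simp [hgt]
        | some e =>
          rw [List.foldl_cons]
          have hstep : pvStepB (acc, some e) x =
              (acc, some (e ++ "\n" ++ PySem.Str.strip (PySem.Str.slice (PySem.Str.strip x) (some 3) none))) := by
            simp [pvStepB, hgt, hdot]
          rw [hstep, ih]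
          have hcont : pvContA e (x :: rest) =
              pvContA (e ++ "\n" ++ PySem.Str.strip (PySem.Str.slice (PySem.Str.strip x) (some 3) none)) rest := by
            simp [pvContA, hdot]
          simp [pvASide, hcont]
      · rw [Bool.not_eq_true] at hdot
        cases e? with
        | none =>
          rw [List.foldl_cons]
          have hstep : pvStepB (acc, none) x = (acc, none) := by
            simp [pvStepB, hgt, hdot]
          rw [hstep, ih]
          simp only [pvASide]
          rw [pvLoopA]
          simp [hgt]
        | some e =>
          rw [List.foldl_cons]
          have hstep : pvStepB (acc, some e) x =
              (acc ++ [(e, if PySem.Str.strip x = "" then none else some (PySem.Str.strip x))], none) := by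
            simp [pvStepB, hgt, hdot]
          rw [hstep, ih]
          have hcont : pvContA e (x :: rest) = (e, x :: rest) := by
            simp [pvContA, hdot]
          have hexp : pvExpectedA (x :: rest) =
              (if PySem.Str.strip x = "" then none else some (PySem.Str.strip x)) := by
            simp only [pvExpectedA]
            by_cases hb : PySem.Str.strip x = ""
            · simp [hb]
            · simp [hb, hgt, hdot]
          simp only [pvASide, hcont, hexp]
          rw [pvLoopA]
          simp [hgt]

-- ===== VERDICT (by name: the statement is the Claim_ definition above) =====
theorem doctest_pairs_py_spec : Claim_equal_doctest_pairs_py := by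
  intro source _
  unfold Spec_doctest_pairs_py doctest_pairs_py doctest_pairs_py_alt
  have h := pv_fold_eq (PySem.Str.splitlines source) [] none
  simp only [pvASide, List.nil_append] at h
  exact (by simpa [pvFinish] using h : _ = pvLoopA (PySem.Str.splitlines source)).symm
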